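-- pv_equiv track=rewrite | github.com/BlueberryDuck/planning-inconsistency-measures | planning_measures/extraction.py | _sequencing
-- ===== SOURCE A (Python) =====
-- def _sequencing(
--     achievable_goals: frozenset[str],
--     g2_after_g1_witnesses: frozenset[tuple[str, str]],
-- ) -> tuple[int, int]:
--     """P3: ordered pair (g1, g2) is a sequencing conflict iff witness absent."""
--     conflicts: set[tuple[str, str]] = set()
--     goals_in_conflict: set[str] = set()
--
--     for g1 in achievable_goals:
--         for g2 in achievable_goals:
--             if g1 != g2 and (g1, g2) not in g2_after_g1_witnesses:
--                 conflicts.add((g1, g2))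
--                 goals_in_conflict.add(g1)
--                 goals_in_conflict.add(g2)
--
--     return len(goals_in_conflict), len(conflicts)
-- ===== SOURCE B (Python) =====
-- def _sequencing(achievable_goals, g2_after_g1_witnesses):
--     goals = set(achievable_goals)
--     n = len(goals)
--     valid = 0
--     outdeg = {}
--     indeg = {}
--     for g1, g2 in set(g2_after_g1_witnesses):
--         if g1 != g2 and g1 in goals and g2 in goals:
--             valid += 1
--             outdeg[g1] = outdeg.get(g1, 0) + 1
--             indeg[g2] = indeg.get(g2, 0) + 1
--     full = sum(1 for g in goals
--                if outdeg.get(g, 0) == n - 1 and indeg.get(g, 0) == n - 1)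
--     return n - full, n * (n - 1) - valid
-- ===== Notes on version B (the rewrite author's own statement) =====
-- stated objective: faster
-- what changed: B replaces A's O(n^2) double loop over all ordered goal pairs by a single pass over the witness set: conflicts = n*(n-1) minus the number of valid witnesses, and a goal is conflict-free exactly when its witness in- and out-degrees both equal n-1.
import Mathlib
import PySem

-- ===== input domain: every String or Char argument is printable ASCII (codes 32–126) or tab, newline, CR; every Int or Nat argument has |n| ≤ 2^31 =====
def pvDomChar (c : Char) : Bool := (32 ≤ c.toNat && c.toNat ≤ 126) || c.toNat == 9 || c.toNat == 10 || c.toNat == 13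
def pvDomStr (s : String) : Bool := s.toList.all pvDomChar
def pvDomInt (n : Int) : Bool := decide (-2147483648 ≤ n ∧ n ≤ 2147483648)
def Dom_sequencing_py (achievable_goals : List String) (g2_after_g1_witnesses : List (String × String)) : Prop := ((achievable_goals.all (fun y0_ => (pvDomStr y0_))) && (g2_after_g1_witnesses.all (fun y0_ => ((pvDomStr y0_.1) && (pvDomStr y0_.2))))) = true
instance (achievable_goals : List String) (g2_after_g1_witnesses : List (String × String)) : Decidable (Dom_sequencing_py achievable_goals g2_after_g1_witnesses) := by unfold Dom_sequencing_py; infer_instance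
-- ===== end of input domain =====

-- B replaces A's O(n^2) double loop over all ordered goal pairs by degree counting over the
-- witness set: conflicts = n*(n-1) - (number of valid witnesses), and a goal is conflict-free
-- iff its witness in- and out-degrees are both n-1.  O(n + W) instead of O(n^2 * W-lookup).

-- ===== PORT A =====
def sequencing_py (achievable_goals : List String) (g2_after_g1_witnesses : List (String × String)) : Int × Int :=
  -- conflicts, goals_in_conflict start as empty sets; nested loop over the goal set
  let st : PySem.Set (String × String) × PySem.Set String :=
    achievable_goals.foldl (fun st g1 =>
      achievable_goals.foldl (fun st g2 =>
        if g1 ≠ g2 ∧ (g1, g2) ∉ g2_after_g1_witnesses then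
          (st.1.add (g1, g2), (st.2.add g1).add g2)
        else st) st)
      (PySem.Set.empty, PySem.Set.empty)
  (PySem.Set.len st.2, PySem.Set.len st.1)

-- ===== PORT B =====
def sequencing_py_alt (achievable_goals : List String) (g2_after_g1_witnesses : List (String × String)) : Int × Int :=
  let goals := PySem.Set.ofList achievable_goals
  let n := PySem.Set.len goals
  let acc : Int × PySem.Dict String Int × PySem.Dict String Int :=
    (PySem.Set.ofList g2_after_g1_witnesses).foldl
      (fun acc p =>
        if p.1 ≠ p.2 ∧ PySem.Set.contains goals p.1 ∧ PySem.Set.contains goals p.2 then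
          (acc.1 + 1,
           acc.2.1.insert p.1 (acc.2.1.getD p.1 0 + 1),
           acc.2.2.insert p.2 (acc.2.2.getD p.2 0 + 1))
        else acc)
      (0, PySem.Dict.empty, PySem.Dict.empty)
  let full : Int :=
    (goals.countP (fun g => acc.2.1.getD g 0 == n - 1 && acc.2.2.getD g 0 == n - 1) : Int)
  (n - full, n * (n - 1) - acc.1)

-- ===== PRECONDITION & SPEC =====
-- The two List arguments encode Python frozensets, which cannot hold duplicates: lists with
-- duplicate elements correspond to no Python input, so Pre_ requires both lists to be duplicate-free.
def Pre_sequencing_py (achievable_goals : List String) (g2_after_g1_witnesses : List (String × String)) : Prop :=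
  achievable_goals.Nodup ∧ g2_after_g1_witnesses.Nodup
instance (achievable_goals : List String) (g2_after_g1_witnesses : List (String × String)) : Decidable (Pre_sequencing_py achievable_goals g2_after_g1_witnesses) := by unfold Pre_sequencing_py; infer_instance
def pvWitness_sequencing_py : List String × (List (String × String)) :=
  (["a", "b", "c"], [("a", "b"), ("b", "a"), ("a", "c")])

def Spec_sequencing_py (achievable_goals : List String) (g2_after_g1_witnesses : List (String × String)) (out : Int × Int) : Prop := out = sequencing_py_alt achievable_goals g2_after_g1_witnesses
instance (achievable_goals : List String) (g2_after_g1_witnesses : List (String × String)) (out : Int × Int) : Decidable (Spec_sequencing_py achievable_goals g2_after_g1_witnesses out) := by unfold Spec_sequencing_py; infer_instance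

-- ===== CLAIM (what is proved, stated in full; the proofs are below) =====
def Claim_equal_sequencing_py : Prop := ∀ (achievable_goals : List String) (g2_after_g1_witnesses : List (String × String)), Dom_sequencing_py achievable_goals g2_after_g1_witnesses → Pre_sequencing_py achievable_goals g2_after_g1_witnesses → Spec_sequencing_py achievable_goals g2_after_g1_witnesses (sequencing_py achievable_goals g2_after_g1_witnesses)

-- ===== LEMMAS AND PROOFS =====

def pvAInner (W : List (String × String)) (g1 : String)
    (st : PySem.Set (String × String) × PySem.Set String) (g2 : String) :
    PySem.Set (String × String) × PySem.Set String :=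
  if g1 ≠ g2 ∧ (g1, g2) ∉ W then (st.1.add (g1, g2), (st.2.add g1).add g2) else st

lemma pv_inner_mem (W : List (String × String)) (g1 : String) (L : List String)
    (st : PySem.Set (String × String) × PySem.Set String) :
    (∀ p, p ∈ (L.foldl (pvAInner W g1) st).1 ↔
      p ∈ st.1 ∨ ∃ g2 ∈ L, p = (g1, g2) ∧ g1 ≠ g2 ∧ (g1, g2) ∉ W) ∧
    (∀ g, g ∈ (L.foldl (pvAInner W g1) st).2 ↔
      g ∈ st.2 ∨ ∃ g2 ∈ L, (g1 ≠ g2 ∧ (g1, g2) ∉ W) ∧ (g = g1 ∨ g = g2)) := by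
  induction L generalizing st with
  | nil => simp
  | cons g2 L ih =>
    simp only [List.foldl_cons]
    constructor
    · intro p
      rw [(ih _).1]
      by_cases h : g1 ≠ g2 ∧ (g1, g2) ∉ W
      · rw [pvAInner, if_pos h]
        simp only [PySem.Set.mem_add, List.mem_cons]
        constructor
        · rintro ((hp | rfl) | ⟨g', hg', rfl, hcond⟩)
          · exact Or.inl hp
          · exact Or.inr ⟨_, Or.inl rfl, rfl, h⟩
          · exact Or.inr ⟨g', Or.inr hg', rfl, hcond⟩
        · rintro (hp | ⟨g', (rfl | hg'), rfl, hcond⟩)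
          · exact Or.inl (Or.inl hp)
          · exact Or.inl (Or.inr rfl)
          · exact Or.inr ⟨g', hg', rfl, hcond⟩
      · rw [pvAInner, if_neg h]
        simp only [List.mem_cons]
        constructor
        · rintro (hp | ⟨g', hg', rfl, hcond⟩)
          · exact Or.inl hp
          · exact Or.inr ⟨g', Or.inr hg', rfl, hcond⟩
        · rintro (hp | ⟨g', (rfl | hg'), rfl, hcond⟩)
          · exact Or.inl hp
          · exact absurd hcond h
          · exact Or.inr ⟨g', hg', rfl, hcond⟩
    · intro g
      rw [(ih _).2]
      by_cases h : g1 ≠ g2 ∧ (g1, g2) ∉ W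
      · rw [pvAInner, if_pos h]
        simp only [PySem.Set.mem_add, List.mem_cons]
        constructor
        · rintro (((hg | rfl) | rfl) | ⟨g', hg', hcond, hor⟩)
          · exact Or.inl hg
          · exact Or.inr ⟨_, Or.inl rfl, h, Or.inl rfl⟩
          · exact Or.inr ⟨_, Or.inl rfl, h, Or.inr rfl⟩
          · exact Or.inr ⟨g', Or.inr hg', hcond, hor⟩
        · rintro (hg | ⟨g', (rfl | hg'), hcond, hor⟩)
          · exact Or.inl (Or.inl (Or.inl hg))
          · rcases hor with rfl | rfl
            · exact Or.inl (Or.inl (Or.inr rfl))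
            · exact Or.inl (Or.inr rfl)
          · exact Or.inr ⟨g', hg', hcond, hor⟩
      · rw [pvAInner, if_neg h]
        simp only [List.mem_cons]
        constructor
        · rintro (hg | ⟨g', hg', hcond, hor⟩)
          · exact Or.inl hg
          · exact Or.inr ⟨g', Or.inr hg', hcond, hor⟩
        · rintro (hg | ⟨g', (rfl | hg'), hcond, hor⟩)
          · exact Or.inl hg
          · exact absurd hcond h
          · exact Or.inr ⟨g', hg', hcond, hor⟩

lemma pv_inner_nodup (W : List (String × String)) (g1 : String) (L : List String)
    (st : PySem.Set (String × String) × PySem.Set String)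
    (h1 : st.1.Nodup) (h2 : st.2.Nodup) :
    (L.foldl (pvAInner W g1) st).1.Nodup ∧ (L.foldl (pvAInner W g1) st).2.Nodup := by
  induction L generalizing st with
  | nil => exact ⟨h1, h2⟩
  | cons g2 L ih =>
    simp only [List.foldl_cons]
    refine ih _ ?_ ?_ <;> rw [pvAInner] <;> split
    · exact PySem.Set.nodup_add _ _ h1
    · exact h1
    · exact PySem.Set.nodup_add _ _ (PySem.Set.nodup_add _ _ h2)
    · exact h2

lemma pv_outer_mem (W : List (String × String)) (G L : List String)
    (st : PySem.Set (String × String) × PySem.Set String) :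
    (∀ p, p ∈ (L.foldl (fun st g1 => G.foldl (pvAInner W g1) st) st).1 ↔
      p ∈ st.1 ∨ (p.1 ∈ L ∧ p.2 ∈ G ∧ p.1 ≠ p.2 ∧ p ∉ W)) ∧
    (∀ g, g ∈ (L.foldl (fun st g1 => G.foldl (pvAInner W g1) st) st).2 ↔
      g ∈ st.2 ∨ ∃ g1 ∈ L, ∃ g2 ∈ G, (g1 ≠ g2 ∧ (g1, g2) ∉ W) ∧ (g = g1 ∨ g = g2)) := by
  induction L generalizing st with
  | nil => simp
  | cons a L ih =>
    simp only [List.foldl_cons]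
    constructor
    · intro p
      rw [(ih _).1, (pv_inner_mem W a G st).1 p]
      simp only [List.mem_cons]
      constructor
      · rintro ((hp | ⟨g2, hg2, rfl, hcond⟩) | ⟨h1, h2, h3, h4⟩)
        · exact Or.inl hp
        · exact Or.inr ⟨Or.inl rfl, hg2, hcond⟩
        · exact Or.inr ⟨Or.inr h1, h2, h3, h4⟩
      · rintro (hp | ⟨(h1 | h1), h2, h3, h4⟩)
        · exact Or.inl (Or.inl hp)
        · subst h1
          exact Or.inl (Or.inr ⟨p.2, h2, rfl, h3, h4⟩)
        · exact Or.inr ⟨h1, h2, h3, h4⟩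
    · intro g
      rw [(ih _).2, (pv_inner_mem W a G st).2 g]
      simp only [List.mem_cons]
      constructor
      · rintro ((hg | ⟨g2, hg2, hcond, hor⟩) | ⟨g1, hg1, g2, hg2, hcond, hor⟩)
        · exact Or.inl hg
        · exact Or.inr ⟨a, Or.inl rfl, g2, hg2, hcond, hor⟩
        · exact Or.inr ⟨g1, Or.inr hg1, g2, hg2, hcond, hor⟩
      · rintro (hg | ⟨g1, (rfl | hg1), g2, hg2, hcond, hor⟩)
        · exact Or.inl (Or.inl hg)
        · exact Or.inl (Or.inr ⟨g2, hg2, hcond, hor⟩)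
        · exact Or.inr ⟨g1, hg1, g2, hg2, hcond, hor⟩

lemma pv_outer_nodup (W : List (String × String)) (G L : List String)
    (st : PySem.Set (String × String) × PySem.Set String)
    (h1 : st.1.Nodup) (h2 : st.2.Nodup) :
    (L.foldl (fun st g1 => G.foldl (pvAInner W g1) st) st).1.Nodup ∧
    (L.foldl (fun st g1 => G.foldl (pvAInner W g1) st) st).2.Nodup := by
  induction L generalizing st with
  | nil => exact ⟨h1, h2⟩
  | cons a L ih =>
    simp only [List.foldl_cons]
    exact ih _ (pv_inner_nodup W a G st h1 h2).1 (pv_inner_nodup W a G st h1 h2).2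

def pvValid (G : List String) (p : String × String) : Bool :=
  decide (p.1 ≠ p.2 ∧ p.1 ∈ G ∧ p.2 ∈ G)

def pvBStep (G : List String) (acc : Int × PySem.Dict String Int × PySem.Dict String Int)
    (p : String × String) : Int × PySem.Dict String Int × PySem.Dict String Int :=
  if p.1 ≠ p.2 ∧ PySem.Set.contains G p.1 ∧ PySem.Set.contains G p.2 then
    (acc.1 + 1,
     acc.2.1.insert p.1 (acc.2.1.getD p.1 0 + 1),
     acc.2.2.insert p.2 (acc.2.2.getD p.2 0 + 1))
  else acc

lemma pv_bfold (G : List String) (L : List (String × String))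
    (acc : Int × PySem.Dict String Int × PySem.Dict String Int) :
    (L.foldl (pvBStep G) acc).1 = acc.1 + (L.countP (pvValid G) : Int) ∧
    (∀ g, ((L.foldl (pvBStep G) acc).2.1).getD g 0
      = acc.2.1.getD g 0 + (L.countP (fun p => pvValid G p && p.1 == g) : Int)) ∧
    (∀ g, ((L.foldl (pvBStep G) acc).2.2).getD g 0
      = acc.2.2.getD g 0 + (L.countP (fun p => pvValid G p && p.2 == g) : Int)) := by
  induction L generalizing acc with
  | nil => simp
  | cons p L ih =>
    simp only [List.foldl_cons, List.countP_cons]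
    by_cases h : p.1 ≠ p.2 ∧ PySem.Set.contains G p.1 ∧ PySem.Set.contains G p.2
    · have hv : pvValid G p = true := by
        simp only [PySem.Set.contains_iff] at h
        simp [pvValid, h.1, h.2.1, h.2.2]
      have hstep : pvBStep G acc p
          = (acc.1 + 1, acc.2.1.insert p.1 (acc.2.1.getD p.1 0 + 1),
             acc.2.2.insert p.2 (acc.2.2.getD p.2 0 + 1)) := by
        rw [pvBStep, if_pos h]
      refine ⟨?_, fun g => ?_, fun g => ?_⟩
      · rw [(ih _).1, hstep, hv]; simp; ring
      · rw [(ih _).2.1 g, hstep, hv]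
        by_cases hg : p.1 = g
        · subst hg
          rw [PySem.Dict.getD_insert_self]; simp; ring
        · rw [PySem.Dict.getD_insert_of_ne _ _ _ (fun hc => hg hc.symm)]
          simp [hg]
      · rw [(ih _).2.2 g, hstep, hv]
        by_cases hg : p.2 = g
        · subst hg
          rw [PySem.Dict.getD_insert_self]; simp; ring
        · rw [PySem.Dict.getD_insert_of_ne _ _ _ (fun hc => hg hc.symm)]
          simp [hg]
    · have hv : pvValid G p = false := by
        simp only [PySem.Set.contains_iff] at h
        simp only [pvValid, decide_eq_false_iff_not]
        simpa using h
      have hstep : pvBStep G acc p = acc := by rw [pvBStep, if_neg h]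
      refine ⟨?_, fun g => ?_, fun g => ?_⟩
      · rw [(ih _).1, hstep, hv]; simp
      · rw [(ih _).2.1 g, hstep, hv]; simp
      · rw [(ih _).2.2 g, hstep, hv]; simp

-- conflicts count
lemma pv_conflicts (G : List String) (W : List (String × String))
    (hG : G.Nodup) (hW : W.Nodup) :
    (G.foldl (fun st g1 => G.foldl (pvAInner W g1) st)
        (PySem.Set.empty, PySem.Set.empty)).1.length + W.countP (pvValid G)
      = G.length * G.length - G.length := by
  set st := G.foldl (fun st g1 => G.foldl (pvAInner W g1) st)
      (PySem.Set.empty, PySem.Set.empty) with hst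
  have hmem : ∀ p, p ∈ st.1 ↔ p.1 ∈ G ∧ p.2 ∈ G ∧ p.1 ≠ p.2 ∧ p ∉ W := by
    intro p
    rw [hst, (pv_outer_mem W G G _).1 p]
    simp [PySem.Set.empty]
  have hnd : st.1.Nodup :=
    (pv_outer_nodup W G G _ (by simp [PySem.Set.empty]) (by simp [PySem.Set.empty])).1
  have hF1 : st.1.toFinset = G.toFinset.offDiag \ W.toFinset := by
    ext p
    simp only [List.mem_toFinset, hmem, Finset.mem_sdiff, Finset.mem_offDiag]
    tauto
  have hF2 : (W.filter (pvValid G)).toFinset = G.toFinset.offDiag ∩ W.toFinset := by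
    ext p
    simp only [List.mem_toFinset, List.mem_filter, Finset.mem_inter, Finset.mem_offDiag,
      pvValid, decide_eq_true_eq]
    tauto
  have h1 : st.1.length = (G.toFinset.offDiag \ W.toFinset).card := by
    rw [← hF1, List.toFinset_card_of_nodup hnd]
  have h2 : W.countP (pvValid G) = (G.toFinset.offDiag ∩ W.toFinset).card := by
    rw [← hF2, List.toFinset_card_of_nodup (hW.filter _), List.countP_eq_length_filter]
  rw [h1, h2, Finset.card_sdiff_add_card_inter, Finset.offDiag_card,
    List.toFinset_card_of_nodup hG]

-- out-degree characterization
lemma pv_degree (G : List String) (W : List (String × String))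
    (hG : G.Nodup) (hW : W.Nodup) (g : String) (hg : g ∈ G) :
    W.countP (fun p => pvValid G p && p.1 == g) = G.length - 1 ↔
      ∀ h ∈ G, h ≠ g → (g, h) ∈ W := by
  set S := (W.filter (fun p => pvValid G p && p.1 == g)).map Prod.snd with hS
  have hfst : ∀ p ∈ W.filter (fun p => pvValid G p && p.1 == g), p.1 = g := by
    intro p hp
    have := (List.mem_filter.mp hp).2
    simp only [Bool.and_eq_true, beq_iff_eq] at this
    exact this.2
  have hSnd : S.Nodup := by
    refine List.Nodup.map_on ?_ (hW.filter _)
    intro x hx y hy hxy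
    have h1 := hfst x hx
    have h2 := hfst y hy
    exact Prod.ext_iff.mpr ⟨h1.trans h2.symm, hxy⟩
  have hmemS : ∀ h, h ∈ S ↔ (g, h) ∈ W ∧ h ≠ g ∧ h ∈ G := by
    intro h
    simp only [hS, List.mem_map, List.mem_filter, Bool.and_eq_true, beq_iff_eq,
      pvValid, decide_eq_true_eq]
    constructor
    · rintro ⟨p, ⟨hpW, ⟨hne, h1G, h2G⟩, hp1⟩, rfl⟩
      obtain ⟨x, y⟩ := p
      simp only at hp1 hne h1G h2G ⊢
      subst hp1
      exact ⟨hpW, fun hc => hne hc.symm, h2G⟩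
    · rintro ⟨hW', hne, hG'⟩
      exact ⟨(g, h), ⟨hW', ⟨fun hc => hne hc.symm, hg, hG'⟩, rfl⟩, rfl⟩
  have hcount : W.countP (fun p => pvValid G p && p.1 == g) = S.length := by
    rw [hS, List.length_map, List.countP_eq_length_filter]
  have hsub : S.toFinset ⊆ G.toFinset.erase g := by
    intro h hh
    rw [List.mem_toFinset, hmemS] at hh
    rw [Finset.mem_erase, List.mem_toFinset]
    exact ⟨hh.2.1, hh.2.2⟩
  have hcard : (G.toFinset.erase g).card = G.length - 1 := by
    rw [Finset.card_erase_of_mem (List.mem_toFinset.mpr hg), List.toFinset_card_of_nodup hG]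
  have hSlen : S.length = S.toFinset.card := (List.toFinset_card_of_nodup hSnd).symm
  constructor
  · intro hlen h hh hne
    have heq : S.toFinset = G.toFinset.erase g := by
      refine Finset.eq_of_subset_of_card_le hsub ?_
      rw [hcard, ← hSlen, ← hcount, hlen]
    have : h ∈ S.toFinset := by
      rw [heq, Finset.mem_erase, List.mem_toFinset]; exact ⟨hne, hh⟩
    rw [List.mem_toFinset, hmemS] at this
    exact this.1
  · intro hall
    have heq : S.toFinset = G.toFinset.erase g := by
      refine le_antisymm hsub ?_
      intro h hh
      rw [Finset.mem_erase, List.mem_toFinset] at hh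
      rw [List.mem_toFinset, hmemS]
      exact ⟨hall h hh.2 hh.1, hh.1, hh.2⟩
    rw [hcount, hSlen, heq, hcard]

-- in-degree characterization, by applying pv_degree to the swapped witness list
lemma pv_degree_in (G : List String) (W : List (String × String))
    (hG : G.Nodup) (hW : W.Nodup) (g : String) (hg : g ∈ G) :
    W.countP (fun p => pvValid G p && p.2 == g) = G.length - 1 ↔
      ∀ h ∈ G, h ≠ g → (h, g) ∈ W := by
  have hswap : W.countP (fun p => pvValid G p && p.2 == g)
      = (W.map Prod.swap).countP (fun q => pvValid G q && q.1 == g) := by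
    rw [List.countP_map]
    refine List.countP_congr ?_
    intro p _
    simp only [Function.comp, Prod.swap, pvValid, Bool.and_eq_true, decide_eq_true_eq,
      beq_iff_eq]
    tauto
  rw [hswap, pv_degree G (W.map Prod.swap) hG (hW.map Prod.swap_injective) g hg]
  constructor
  · intro hall h hh hne
    have := hall h hh hne
    rcases List.mem_map.mp this with ⟨q, hq, hq2⟩
    obtain ⟨x, y⟩ := q
    cases hq2
    exact hq
  · intro hall h hh hne
    exact List.mem_map.mpr ⟨(h, g), hall h hh hne, rfl⟩

-- goals-in-conflict count
lemma pv_goals (G : List String) (W : List (String × String))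
    (hG : G.Nodup) :
    (G.foldl (fun st g1 => G.foldl (pvAInner W g1) st)
        (PySem.Set.empty, PySem.Set.empty)).2.length
      = G.countP (fun g => decide (∃ h ∈ G, h ≠ g ∧ ((g, h) ∉ W ∨ (h, g) ∉ W))) := by
  set st := G.foldl (fun st g1 => G.foldl (pvAInner W g1) st)
      (PySem.Set.empty, PySem.Set.empty) with hst
  have hmem : ∀ g, g ∈ st.2 ↔
      g ∈ G ∧ ∃ h ∈ G, h ≠ g ∧ ((g, h) ∉ W ∨ (h, g) ∉ W) := by
    intro g
    rw [hst, (pv_outer_mem W G G _).2 g]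
    simp only [PySem.Set.empty, List.not_mem_nil, false_or]
    constructor
    · rintro ⟨g1, hg1, g2, hg2, ⟨hne, hnW⟩, (rfl | rfl)⟩
      · exact ⟨hg1, g2, hg2, fun hc => hne hc.symm, Or.inl hnW⟩
      · exact ⟨hg2, g1, hg1, fun hc => hne hc, Or.inr hnW⟩
    · rintro ⟨hgG, h, hh, hne, (hnW | hnW)⟩
      · exact ⟨g, hgG, h, hh, ⟨fun hc => hne hc.symm, hnW⟩, Or.inl rfl⟩
      · exact ⟨h, hh, g, hgG, ⟨fun hc => hne hc, hnW⟩, Or.inr rfl⟩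
  have hnd : st.2.Nodup :=
    (pv_outer_nodup W G G _ (by simp [PySem.Set.empty]) (by simp [PySem.Set.empty])).2
  have hperm : st.2.Perm
      (G.filter (fun g => decide (∃ h ∈ G, h ≠ g ∧ ((g, h) ∉ W ∨ (h, g) ∉ W)))) := by
    rw [List.perm_ext_iff_of_nodup hnd (hG.filter _)]
    intro g
    rw [hmem, List.mem_filter, decide_eq_true_eq]
  rw [hperm.length_eq, List.countP_eq_length_filter]
-- inline-lambda restatements (definitionally equal to the helper forms above)
lemma pv_bfold' (G : List String) (L : List (String × String))
    (acc : Int × PySem.Dict String Int × PySem.Dict String Int) :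
    (L.foldl (fun acc p =>
        if p.1 ≠ p.2 ∧ PySem.Set.contains G p.1 ∧ PySem.Set.contains G p.2 then
          (acc.1 + 1,
           acc.2.1.insert p.1 (acc.2.1.getD p.1 0 + 1),
           acc.2.2.insert p.2 (acc.2.2.getD p.2 0 + 1))
        else acc) acc).1 = acc.1 + (L.countP (pvValid G) : Int) ∧
    (∀ g, ((L.foldl (fun acc p =>
        if p.1 ≠ p.2 ∧ PySem.Set.contains G p.1 ∧ PySem.Set.contains G p.2 then
          (acc.1 + 1,
           acc.2.1.insert p.1 (acc.2.1.getD p.1 0 + 1),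
           acc.2.2.insert p.2 (acc.2.2.getD p.2 0 + 1))
        else acc) acc).2.1).getD g 0
      = acc.2.1.getD g 0 + (L.countP (fun p => pvValid G p && p.1 == g) : Int)) ∧
    (∀ g, ((L.foldl (fun acc p =>
        if p.1 ≠ p.2 ∧ PySem.Set.contains G p.1 ∧ PySem.Set.contains G p.2 then
          (acc.1 + 1,
           acc.2.1.insert p.1 (acc.2.1.getD p.1 0 + 1),
           acc.2.2.insert p.2 (acc.2.2.getD p.2 0 + 1))
        else acc) acc).2.2).getD g 0
      = acc.2.2.getD g 0 + (L.countP (fun p => pvValid G p && p.2 == g) : Int)) :=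
  pv_bfold G L acc

lemma pv_conflicts' (G : List String) (W : List (String × String))
    (hG : G.Nodup) (hW : W.Nodup) :
    (G.foldl (fun st g1 => G.foldl (fun st g2 =>
        if g1 ≠ g2 ∧ (g1, g2) ∉ W then (st.1.add (g1, g2), (st.2.add g1).add g2) else st) st)
        (PySem.Set.empty, PySem.Set.empty)).1.length + W.countP (pvValid G)
      = G.length * G.length - G.length :=
  pv_conflicts G W hG hW

lemma pv_goals' (G : List String) (W : List (String × String)) (hG : G.Nodup) :
    (G.foldl (fun st g1 => G.foldl (fun st g2 =>
        if g1 ≠ g2 ∧ (g1, g2) ∉ W then (st.1.add (g1, g2), (st.2.add g1).add g2) else st) st)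
        (PySem.Set.empty, PySem.Set.empty)).2.length
      = G.countP (fun g => decide (∃ h ∈ G, h ≠ g ∧ ((g, h) ∉ W ∨ (h, g) ∉ W))) :=
  pv_goals G W hG

-- ===== VERDICT (by name: the statement is the Claim_ definition above) =====
theorem sequencing_py_spec : Claim_equal_sequencing_py := by
  intro G W _ hPre
  obtain ⟨hG, hW⟩ := hPre
  unfold Spec_sequencing_py
  simp only [sequencing_py, sequencing_py_alt]
  rw [PySem.Set.ofList_eq_self_of_nodup G hG, PySem.Set.ofList_eq_self_of_nodup W hW]
  obtain ⟨hb1, hb2, hb3⟩ := pv_bfold' G W (0, PySem.Dict.empty, PySem.Dict.empty)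
  have hc := pv_conflicts' G W hG hW
  have hg := pv_goals' G W hG
  rw [PySem.Set.len_eq, PySem.Set.len_eq, PySem.Set.len_eq]
  simp only [hb1, hb2, hb3, PySem.Dict.getD_empty, zero_add]
  rw [Prod.mk.injEq]
  constructor
  · -- goals-in-conflict component
    rw [hg]
    have hnn := List.length_eq_countP_add_countP
      (fun g => decide (∃ h ∈ G, h ≠ g ∧ ((g, h) ∉ W ∨ (h, g) ∉ W))) (l := G)
    simp only [decide_not, Bool.decide_eq_true] at hnn
    have hfull : G.countP (fun g =>
        ((W.countP (fun p => pvValid G p && p.1 == g) : Int) == (G.length : Int) - 1) &&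
        ((W.countP (fun p => pvValid G p && p.2 == g) : Int) == (G.length : Int) - 1))
      = G.countP (fun g => !(decide (∃ h ∈ G, h ≠ g ∧ ((g, h) ∉ W ∨ (h, g) ∉ W)))) := by
      refine List.countP_congr ?_
      intro g hgG
      have hlen : 1 ≤ G.length := List.length_pos_of_mem hgG
      simp only [Bool.and_eq_true, beq_iff_eq, Bool.not_eq_eq_eq_not, Bool.not_true,
        decide_eq_false_iff_not]
      constructor
      · rintro ⟨h1, h2⟩
        have hd1 : W.countP (fun p => pvValid G p && p.1 == g) = G.length - 1 := by omega
        have hd2 : W.countP (fun p => pvValid G p && p.2 == g) = G.length - 1 := by omega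
        have ho := (pv_degree G W hG hW g hgG).mp hd1
        have hi := (pv_degree_in G W hG hW g hgG).mp hd2
        rintro ⟨h, hh, hne, (hcw | hcw)⟩
        · exact hcw (ho h hh hne)
        · exact hcw (hi h hh hne)
      · intro hn
        have ho : ∀ h ∈ G, h ≠ g → (g, h) ∈ W := by
          intro h hh hne
          by_contra hcw
          exact hn ⟨h, hh, hne, Or.inl hcw⟩
        have hi : ∀ h ∈ G, h ≠ g → (h, g) ∈ W := by
          intro h hh hne
          by_contra hcw
          exact hn ⟨h, hh, hne, Or.inr hcw⟩
        have hd1 := (pv_degree G W hG hW g hgG).mpr ho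
        have hd2 := (pv_degree_in G W hG hW g hgG).mpr hi
        omega
    rw [hfull]
    omega
  · -- conflicts component
    have hnn : G.length ≤ G.length * G.length := by nlinarith
    have hInt : ((G.foldl (fun st g1 => G.foldl (fun st g2 =>
        if g1 ≠ g2 ∧ (g1, g2) ∉ W then (st.1.add (g1, g2), (st.2.add g1).add g2) else st) st)
        (PySem.Set.empty, PySem.Set.empty)).1.length : Int)
        + (W.countP (pvValid G) : Int)
        = (G.length : Int) * G.length - G.length := by
      have := congrArg (fun k : Nat => (k : Int)) hc
      push_cast [Nat.cast_sub hnn] at this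
      linarith
    linarith
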